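-- pv_equiv track=rewrite | github.com/tlm-solutions/r09-receiver | decode_telegrams.py | bitvec_to_bytes
-- ===== SOURCE A (Python) =====
-- def bitvec_to_bytes(vec):
--     if len(vec) != 8:
--         return 0
--
--     a = 0
--     for i in range(8):
--         if vec[i] > 0:
--             a += 1 << i
--
--     return a
-- ===== SOURCE B (Python) =====
-- def bitvec_to_bytes(vec):
--     if len(vec) != 8:
--         return 0
--
--     def val(bits):
--         if not bits:
--             return 0
--         if len(bits) == 1:
--             return 1 if bits[0] > 0 else 0
--         m = len(bits) // 2
--         return val(bits[:m]) + (1 << m) * val(bits[m:])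
--
--     return val(vec)
-- ===== Notes on version B (the rewrite author's own statement) =====
-- stated objective: alternative
-- what changed: Replaces the linear power-of-two accumulation loop with a divide-and-conquer recursion: the vector is split into halves, each half converted recursively, and combined as low + (1 << m) * high.
import Mathlib
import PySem

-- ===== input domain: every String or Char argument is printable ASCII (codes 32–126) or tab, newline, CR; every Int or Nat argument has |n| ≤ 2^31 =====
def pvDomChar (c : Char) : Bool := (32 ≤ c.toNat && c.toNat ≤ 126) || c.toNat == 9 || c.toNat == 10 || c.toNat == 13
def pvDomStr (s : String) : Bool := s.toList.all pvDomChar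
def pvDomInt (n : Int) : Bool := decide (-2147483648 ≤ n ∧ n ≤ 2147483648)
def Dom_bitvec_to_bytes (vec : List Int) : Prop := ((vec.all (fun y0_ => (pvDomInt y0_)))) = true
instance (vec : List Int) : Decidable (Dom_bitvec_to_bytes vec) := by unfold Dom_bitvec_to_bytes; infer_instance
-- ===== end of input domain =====

-- B replaces the linear power-of-two accumulation with a divide-and-conquer recursion
-- (split into halves, combine as low + 2^m * high) — alternative decomposition, same cost.

-- ===== PORT A =====
-- for i in range(8): if vec[i] > 0: a += 1 << i
-- vec[i] is always in range (the guard guarantees len(vec) = 8 and pyRange 0 8 1 yields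
-- only 0..7), so getD is exact; 1 << i is written 2 ^ i.toNat (equal for i ≥ 0).
def bitvec_to_bytes (vec : List Int) : Int :=
  if vec.length ≠ 8 then 0
  else
    (PySem.List.pyRange 0 8 1).foldl
      (fun a i => if vec.getD i.toNat 0 > 0 then a + 2 ^ i.toNat else a) 0

-- ===== PORT B =====
-- def val(bits): empty -> 0; single -> bit; otherwise split at m = len//2 and combine.
-- bits[:m] / bits[m:] with 0 ≤ m ≤ len are exactly take m / drop m.
def pvValB (bits : List Int) : Int :=
  match bits with
  | [] => 0
  | [b] => if b > 0 then 1 else 0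
  | a :: b :: rest =>
    let m := (a :: b :: rest).length / 2
    pvValB ((a :: b :: rest).take m) + 2 ^ m * pvValB ((a :: b :: rest).drop m)
termination_by bits.length
decreasing_by
  · simp [List.length_take]; omega
  · simp [List.length_drop]; omega

def bitvec_to_bytes_alt (vec : List Int) : Int :=
  if vec.length ≠ 8 then 0 else pvValB vec

-- ===== PRECONDITION & SPEC =====
def Spec_bitvec_to_bytes (vec : List Int) (out : Int) : Prop := out = bitvec_to_bytes_alt vec
instance (vec : List Int) (out : Int) : Decidable (Spec_bitvec_to_bytes vec out) := by unfold Spec_bitvec_to_bytes; infer_instance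

-- ===== CLAIM (what is proved, stated in full; the proofs are below) =====
def Claim_equal_bitvec_to_bytes : Prop := ∀ (vec : List Int), Dom_bitvec_to_bytes vec → Spec_bitvec_to_bytes vec (bitvec_to_bytes vec)

-- ===== LEMMAS AND PROOFS =====

theorem pyRange_0_8 : PySem.List.pyRange 0 8 1 = [0, 1, 2, 3, 4, 5, 6, 7] := by decide

theorem pvValB_eight (x0 x1 x2 x3 x4 x5 x6 x7 : Int) :
    pvValB [x0, x1, x2, x3, x4, x5, x6, x7] =
      (if x0 > 0 then 1 else 0) + 2 * (if x1 > 0 then 1 else 0)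
      + 4 * (if x2 > 0 then 1 else 0) + 8 * (if x3 > 0 then 1 else 0)
      + 16 * (if x4 > 0 then 1 else 0) + 32 * (if x5 > 0 then 1 else 0)
      + 64 * (if x6 > 0 then 1 else 0) + 128 * (if x7 > 0 then 1 else 0) := by
  norm_num [pvValB]
  split_ifs <;> norm_num

theorem ite_add_eq (x a c : Int) :
    (if x > 0 then a + c else a) = a + c * (if x > 0 then 1 else 0) := by
  split_ifs <;> ring

theorem bitvec_to_bytes_agree (vec : List Int) :
    bitvec_to_bytes vec = bitvec_to_bytes_alt vec := by
  by_cases h : vec.length = 8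
  · obtain ⟨x0, x1, x2, x3, x4, x5, x6, x7, t⟩ :
        ∃ x0 x1 x2 x3 x4 x5 x6 x7, vec = [x0, x1, x2, x3, x4, x5, x6, x7] := by
      match vec, h with
      | [x0, x1, x2, x3, x4, x5, x6, x7], _ => exact ⟨x0, x1, x2, x3, x4, x5, x6, x7, rfl⟩
    subst t
    simp only [bitvec_to_bytes, bitvec_to_bytes_alt, pyRange_0_8]
    norm_num [List.foldl, List.getD, Int.toNat, pvValB_eight]
    simp only [ite_add_eq]
    split_ifs <;> norm_num
  · simp [bitvec_to_bytes, bitvec_to_bytes_alt, h]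

-- ===== VERDICT (by name: the statement is the Claim_ definition above) =====
theorem bitvec_to_bytes_spec : Claim_equal_bitvec_to_bytes := by
  intro vec _
  exact bitvec_to_bytes_agree vec
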